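-- pv_equiv track=rewrite | github.com/NWU-NISL-Fuzzing/COMFORT | src/CorpusProcessing/pre_processing/prepro_utils.py | brace_match
-- ===== SOURCE A (Python) =====
-- import typing
--
-- def brace_match(function_list: typing.List[str]) -> typing.List[str]:
--     """将传入的List[str]做括号匹配检查，返回的是其中通过检查的数据List[str]
--     """
--
--     def cut(function_str: str) -> typing.Tuple[bool, str]:
--         """判断传入的function_str是否括号完全匹配，假如是则返回True+正确的文本，
--         """
--         temp_str = ''
--         for char in function_str:
--             temp_str += char
--             left = temp_str.count('{')
--             right = temp_str.count('}')
--             if left == right and left != 0: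
--                 return True, temp_str
--         return False, function_str
--
--     tmp = []
--     for i in function_list:
--         _flag, _function_str = cut(i)
--         if _flag:
--             tmp.append(_function_str)
--
--     return tmp
-- ===== SOURCE B (Python) =====
-- def brace_match(function_list):
--     out = []
--     for s in function_list:
--         l = r = 0
--         for i, ch in enumerate(s):
--             if ch == '{':
--                 l += 1
--             elif ch == '}':
--                 r += 1
--             if l == r and l != 0:
--                 out.append(s[:i + 1])
--                 break
--     return out
-- ===== Notes on version B (the rewrite author's own statement) =====
-- stated objective: faster
-- what changed: Replaces A's quadratic rebuild-and-recount of every prefix (temp_str += char; temp_str.count per step) with a single pass keeping incremental '{'/'}' counters and slicing the matched prefix at the stopping index.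
import Mathlib
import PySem

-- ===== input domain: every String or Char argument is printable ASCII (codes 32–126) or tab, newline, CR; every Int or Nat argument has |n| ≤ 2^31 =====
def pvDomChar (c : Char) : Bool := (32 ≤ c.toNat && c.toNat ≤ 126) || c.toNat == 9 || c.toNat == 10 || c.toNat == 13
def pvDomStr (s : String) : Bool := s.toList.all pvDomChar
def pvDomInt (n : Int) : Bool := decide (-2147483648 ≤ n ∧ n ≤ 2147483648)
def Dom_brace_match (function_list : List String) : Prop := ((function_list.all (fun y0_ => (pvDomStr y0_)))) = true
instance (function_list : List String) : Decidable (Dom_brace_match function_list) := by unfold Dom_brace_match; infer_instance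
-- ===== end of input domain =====

-- B replaces A's per-character rebuild-and-recount of the prefix with one pass of
-- incremental brace counters (objective: faster, asymptotically).

-- ===== PORT A =====
-- A's inner helper `cut`: rebuilds temp_str char by char and recounts '{'/'}' in it each step.
def pvCutA (rest temp orig : List Char) : Bool × List Char :=
  match rest with
  | [] => (false, orig)
  | c :: cs =>
    let temp' := temp ++ [c]
    let left := temp'.count '{'
    let right := temp'.count '}'
    if left = right ∧ left ≠ 0 then (true, temp') else pvCutA cs temp' orig

def brace_match (function_list : List String) : List String :=
  function_list.foldl (fun tmp i =>
    let res := pvCutA i.toList [] i.toList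
    if res.1 then tmp ++ [String.ofList res.2] else tmp) []

-- ===== PORT B =====
-- B's inner loop: incremental counters l, r and position i; returns the matched prefix s[:i+1].
def pvScanB (rest : List Char) (l r i : Nat) (s : List Char) : Option (List Char) :=
  match rest with
  | [] => none
  | c :: cs =>
    let l' := if c = '{' then l + 1 else l
    let r' := if c ≠ '{' ∧ c = '}' then r + 1 else r
    if l' = r' ∧ l' ≠ 0 then some (s.take (i + 1)) else pvScanB cs l' r' (i + 1) s

def brace_match_alt (function_list : List String) : List String :=
  function_list.foldl (fun out s =>
    match pvScanB s.toList 0 0 0 s.toList with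
    | some p => out ++ [String.ofList p]
    | none => out) []

-- ===== PRECONDITION & SPEC =====
def Spec_brace_match (function_list : List String) (out : List String) : Prop := out = brace_match_alt function_list
instance (function_list : List String) (out : List String) : Decidable (Spec_brace_match function_list out) := by unfold Spec_brace_match; infer_instance

-- ===== CLAIM (what is proved, stated in full; the proofs are below) =====
def Claim_equal_brace_match : Prop := ∀ (function_list : List String), Dom_brace_match function_list → Spec_brace_match function_list (brace_match function_list)

-- ===== LEMMAS AND PROOFS =====

-- B's incremental counters coincide with A's recounted prefix counts.
lemma pvScan_eq_cut : ∀ (rest temp orig : List Char), orig = temp ++ rest →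
    pvScanB rest (temp.count '{') (temp.count '}') temp.length orig =
      (if (pvCutA rest temp orig).1 then some (pvCutA rest temp orig).2 else none) := by
  intro rest
  induction rest with
  | nil => intro temp orig h; simp [pvScanB, pvCutA]
  | cons c cs ih =>
    intro temp orig h
    have hl : (if c = '{' then temp.count '{' + 1 else temp.count '{') = (temp ++ [c]).count '{' := by
      by_cases hc : c = '{' <;> simp [hc, List.count_append]
    have hr : (if c ≠ '{' ∧ c = '}' then temp.count '}' + 1 else temp.count '}') = (temp ++ [c]).count '}' := by
      by_cases hc : c = '}'
      · have hne : c ≠ '{' := by subst hc; decide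
        simp [hc, List.count_append]
      · simp [hc, List.count_append]
    have htake : orig.take (temp.length + 1) = temp ++ [c] := by
      subst h
      rw [show temp.length + 1 = temp.length + 1 from rfl, List.take_append]
      simp
    simp only [pvScanB, pvCutA, hl, hr]
    by_cases hcond : List.count '{' (temp ++ [c]) = List.count '}' (temp ++ [c]) ∧ List.count '{' (temp ++ [c]) ≠ 0
    · simp only [if_pos hcond, htake]
      simp
    · have h' : orig = (temp ++ [c]) ++ cs := by simp [h]
      have hlen : (temp ++ [c]).length = temp.length + 1 := by simp
      simp only [if_neg hcond]
      rw [← hlen]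
      exact ih (temp ++ [c]) orig h'

lemma pvStep_eq (out : List String) (s : String) :
    (let res := pvCutA s.toList [] s.toList
     if res.1 then out ++ [String.ofList res.2] else out) =
    (match pvScanB s.toList 0 0 0 s.toList with
     | some p => out ++ [String.ofList p]
     | none => out) := by
  have h := pvScan_eq_cut s.toList [] s.toList (by simp)
  simp only [List.count_nil, List.length_nil] at h
  rw [h]
  cases hfv : (pvCutA s.toList [] s.toList).1 <;> simp [hfv]

lemma pvFold_eq : ∀ (l : List String) (acc : List String),
    l.foldl (fun tmp i =>
      let res := pvCutA i.toList [] i.toList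
      if res.1 then tmp ++ [String.ofList res.2] else tmp) acc =
    l.foldl (fun out s =>
      match pvScanB s.toList 0 0 0 s.toList with
      | some p => out ++ [String.ofList p]
      | none => out) acc := by
  intro l
  induction l with
  | nil => intro acc; rfl
  | cons s rest ih =>
    intro acc
    simp only [List.foldl_cons]
    rw [show (let res := pvCutA s.toList [] s.toList
              if res.1 then acc ++ [String.ofList res.2] else acc) =
            (match pvScanB s.toList 0 0 0 s.toList with
             | some p => acc ++ [String.ofList p]
             | none => acc) from pvStep_eq acc s]
    exact ih _

-- ===== VERDICT (by name: the statement is the Claim_ definition above) =====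
theorem brace_match_spec : Claim_equal_brace_match := by
  intro l _
  unfold Spec_brace_match brace_match brace_match_alt
  exact pvFold_eq l []
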